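-- pv_equiv track=rewrite | github.com/wolkerzheng/sent_filter | dynamic_seg.py | convert_labels_2_bounds
-- ===== SOURCE A (Python) =====
-- def convert_labels_2_bounds(labels_seg):
--     bnds = []
--
--     idx = 0
--     while idx < len(labels_seg):
--         if idx == len(labels_seg) - 1 or labels_seg[idx] != labels_seg[idx + 1]:
--             bnds.append(1)
--         else:
--             bnds.append(0)
--         idx+=1
--
--     return bnds
-- ===== SOURCE B (Python) =====
-- def convert_labels_2_bounds(labels_seg):
--     # run-based: for each maximal run of equal labels, emit (len-1) zeros then a 1
--     bnds = []
--     i, n = 0, len(labels_seg)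
--     while i < n:
--         j = i
--         while j + 1 < n and labels_seg[j + 1] == labels_seg[j]:
--             j += 1
--         bnds.extend([0] * (j - i))
--         bnds.append(1)
--         i = j + 1
--     return bnds
-- ===== Notes on version B (the rewrite author's own statement) =====
-- stated objective: alternative
-- what changed: Replaces the per-index neighbor comparison with run-length grouping: each maximal run of equal labels contributes (len-1) zeros followed by a single 1.
import Mathlib
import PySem

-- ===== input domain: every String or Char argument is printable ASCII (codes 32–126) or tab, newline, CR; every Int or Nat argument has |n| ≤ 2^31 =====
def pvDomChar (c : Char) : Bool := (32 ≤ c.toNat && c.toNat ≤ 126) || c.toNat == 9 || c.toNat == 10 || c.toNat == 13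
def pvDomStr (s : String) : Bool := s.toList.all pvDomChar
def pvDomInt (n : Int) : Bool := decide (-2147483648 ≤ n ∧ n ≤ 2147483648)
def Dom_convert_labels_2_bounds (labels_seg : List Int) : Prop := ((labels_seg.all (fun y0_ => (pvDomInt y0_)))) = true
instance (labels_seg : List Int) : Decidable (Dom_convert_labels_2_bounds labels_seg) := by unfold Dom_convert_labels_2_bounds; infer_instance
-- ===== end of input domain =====

-- B differs from A by run-length grouping instead of per-index neighbor comparison (alternative decomposition, same cost).

-- ===== PORT A =====
-- while loop over idx: emit 1 at the last index or where the next label differs, else 0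
def convert_labels_2_bounds_go (labels : List Int) (idx : Nat) : List Int :=
  if _h : idx < labels.length then
    (if idx = labels.length - 1 ∨ labels.getD idx 0 ≠ labels.getD (idx + 1) 0 then (1 : Int) else 0)
      :: convert_labels_2_bounds_go labels (idx + 1)
  else []
termination_by labels.length - idx

def convert_labels_2_bounds (labels_seg : List Int) : List Int :=
  convert_labels_2_bounds_go labels_seg 0

-- ===== PORT B =====
-- inner while loop: advance j over the run of labels equal to x; returns (run extension length, rest)
def convert_labels_2_bounds_run (x : Int) : List Int → Nat × List Int
  | [] => (0, [])
  | y :: ys =>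
    if y = x then
      let p := convert_labels_2_bounds_run y ys
      (p.1 + 1, p.2)
    else (0, y :: ys)

theorem convert_labels_2_bounds_run_len (x : Int) (xs : List Int) :
    (convert_labels_2_bounds_run x xs).2.length ≤ xs.length := by
  induction xs generalizing x with
  | nil => simp [convert_labels_2_bounds_run]
  | cons y ys ih =>
    simp only [convert_labels_2_bounds_run]
    split
    · exact le_trans (ih y) (Nat.le_succ _)
    · simp

def convert_labels_2_bounds_alt (labels_seg : List Int) : List Int :=
  match labels_seg with
  | [] => []
  | x :: xs =>
    let p := convert_labels_2_bounds_run x xs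
    List.replicate p.1 0 ++ [1] ++ convert_labels_2_bounds_alt p.2
termination_by labels_seg.length
decreasing_by
  exact Nat.lt_succ_of_le (convert_labels_2_bounds_run_len x xs)

-- ===== PRECONDITION & SPEC =====
def Spec_convert_labels_2_bounds (labels_seg : List Int) (out : List Int) : Prop := out = convert_labels_2_bounds_alt labels_seg
instance (labels_seg : List Int) (out : List Int) : Decidable (Spec_convert_labels_2_bounds labels_seg out) := by unfold Spec_convert_labels_2_bounds; infer_instance

-- ===== CLAIM (what is proved, stated in full; the proofs are below) =====
def Claim_equal_convert_labels_2_bounds : Prop := ∀ (labels_seg : List Int), Dom_convert_labels_2_bounds labels_seg → Spec_convert_labels_2_bounds labels_seg (convert_labels_2_bounds labels_seg)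

-- ===== LEMMAS AND PROOFS =====

-- simple recursive characterisation both ports are proved equal to
def cl2bSpec : List Int → List Int
  | [] => []
  | [_] => [1]
  | x :: y :: ys => (if x ≠ y then (1 : Int) else 0) :: cl2bSpec (y :: ys)

theorem cl2b_go_shift (x : Int) (xs : List Int) (i : Nat) :
    convert_labels_2_bounds_go (x :: xs) (i + 1) = convert_labels_2_bounds_go xs i := by
  induction hn : xs.length - i using Nat.strong_induction_on generalizing i with
  | _ n ih =>
    rw [convert_labels_2_bounds_go]
    conv_rhs => rw [convert_labels_2_bounds_go]
    by_cases hlt : i < xs.length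
    · have h1 : i + 1 < (x :: xs).length := by simp; omega
      rw [dif_pos h1, dif_pos hlt]
      have heq : (i + 1 = (x :: xs).length - 1 ∨
            (x :: xs).getD (i + 1) 0 ≠ (x :: xs).getD (i + 1 + 1) 0) ↔
          (i = xs.length - 1 ∨ xs.getD i 0 ≠ xs.getD (i + 1) 0) := by
        simp only [List.length_cons, List.getD_cons_succ]
        constructor <;> rintro (h | h) <;> first | (left; omega) | (right; exact h)
      have hrec := ih (xs.length - (i + 1)) (by omega) (i + 1) rfl
      by_cases hc : i = xs.length - 1 ∨ xs.getD i 0 ≠ xs.getD (i + 1) 0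
      · rw [if_pos (heq.mpr hc), if_pos hc, hrec]
      · rw [if_neg (fun h => hc (heq.mp h)), if_neg hc, hrec]
    · have h1 : ¬ i + 1 < (x :: xs).length := by simp; omega
      rw [dif_neg h1, dif_neg hlt]

theorem cl2b_A_eq_spec (xs : List Int) : convert_labels_2_bounds xs = cl2bSpec xs := by
  induction xs with
  | nil => simp [convert_labels_2_bounds, convert_labels_2_bounds_go, cl2bSpec]
  | cons x xs ih =>
    cases xs with
    | nil => simp [convert_labels_2_bounds, convert_labels_2_bounds_go, cl2bSpec]
    | cons y ys =>
      show convert_labels_2_bounds_go (x :: y :: ys) 0 = _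
      rw [convert_labels_2_bounds_go, dif_pos (by simp)]
      rw [show (0 : Nat) + 1 = 1 from rfl, cl2b_go_shift]
      have hcond : (0 = (x :: y :: ys).length - 1 ∨
          (x :: y :: ys).getD 0 0 ≠ (x :: y :: ys).getD 1 0) ↔ x ≠ y := by
        simp
      rw [cl2bSpec]
      by_cases hxy : x ≠ y
      · rw [if_pos (hcond.mpr hxy), if_pos hxy]
        exact congrArg _ ih
      · rw [if_neg (fun h => hxy (hcond.mp h)), if_neg hxy]
        exact congrArg _ ih

theorem cl2b_B_eq_spec (xs : List Int) : convert_labels_2_bounds_alt xs = cl2bSpec xs := by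
  induction xs with
  | nil => simp [convert_labels_2_bounds_alt, cl2bSpec]
  | cons x xs ih =>
    cases xs with
    | nil => simp [convert_labels_2_bounds_alt, convert_labels_2_bounds_run, cl2bSpec]
    | cons y ys =>
      by_cases hxy : y = x
      · subst hxy
        rw [convert_labels_2_bounds_alt, cl2bSpec, if_neg (by simp), ← ih,
          convert_labels_2_bounds_alt]
        simp [convert_labels_2_bounds_run, List.replicate_succ]
      · rw [convert_labels_2_bounds_alt, cl2bSpec, if_pos (fun h => hxy h.symm)]
        simp [convert_labels_2_bounds_run, hxy, ih]

-- ===== VERDICT (by name: the statement is the Claim_ definition above) =====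
theorem convert_labels_2_bounds_spec : Claim_equal_convert_labels_2_bounds := by
  intro xs _
  unfold Spec_convert_labels_2_bounds
  rw [cl2b_A_eq_spec, cl2b_B_eq_spec]
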